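-- pv_equiv track=rewrite | github.com/Hwang-Junsu/Coding_Test | Implementation/programmers/Lv.2/괄호 회전하기.py | solution
-- ===== SOURCE A (Python) =====
-- from collections import deque
--
-- def check(s) :
--     stack = []
--     for i in range(len(s)) :
--
--         if len(stack) == 0 :
--             stack.append(s[i])
--         elif s[i] == ']' and stack[-1] == "[" :
--             stack.pop()
--         elif s[i] == '}' and stack[-1] == "{" :
--             stack.pop()
--         elif s[i] == ')' and stack[-1] == "(" :
--             stack.pop()
--         else :
--             stack.append(s[i])
--
--     if len(stack) == 0 :
--         return True
--     return False
--
-- def solution(s):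
--     answer = 0
--     box = deque(s)
--
--     for i in range(len(box)) :
--         if check(box) == True :
--             answer += 1
--         box.rotate(-1)
--
--
--
--     return answer
-- ===== SOURCE B (Python) =====
-- def _reduced_empty(t):
--     while True:
--         u = t.replace("()", "").replace("[]", "").replace("{}", "")
--         if u == t:
--             return t == ""
--         t = u
--
-- def solution(s):
--     n = len(s)
--     d = s + s
--     return sum(1 for i in range(n) if _reduced_empty(d[i:i + n]))
-- ===== Notes on version B (the rewrite author's own statement) =====
-- stated objective: alternative
-- what changed: The stack-based balance check is replaced by iterative pair elimination (repeatedly deleting every adjacent matched bracket pair via str.replace until a fixpoint, balanced iff the string becomes empty), and rotations are taken as length-n windows of the doubled string summed with a generator instead of deque.rotate; equivalence rests on the proved fact that deleting a matched pair never changes the stack machine's final stack.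
import Mathlib
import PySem

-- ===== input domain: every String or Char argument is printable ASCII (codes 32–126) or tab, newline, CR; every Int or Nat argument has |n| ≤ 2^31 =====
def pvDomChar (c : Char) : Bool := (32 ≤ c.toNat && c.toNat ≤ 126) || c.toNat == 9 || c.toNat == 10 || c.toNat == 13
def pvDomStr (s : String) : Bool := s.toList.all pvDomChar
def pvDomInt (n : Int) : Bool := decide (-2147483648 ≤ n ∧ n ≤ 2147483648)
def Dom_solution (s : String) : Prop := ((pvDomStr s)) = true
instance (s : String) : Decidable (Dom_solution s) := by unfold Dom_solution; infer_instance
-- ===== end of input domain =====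

-- B replaces A's stack-based balance check by iterative pair elimination (repeated deletion of
-- "()", "[]", "{}") and takes the rotations as length-n windows of s+s instead of deque rotation
-- (objective: alternative algorithm; a timing run measured B faster — the replace passes run in C).

-- ===== PORT A =====
-- one iteration of check's loop; Python's stack keeps its top LAST, here the top is the list HEAD
def checkStep (stack : List Char) (c : Char) : List Char :=
  match stack with
  | [] => [c]
  | top :: rest =>
    if c = ']' ∧ top = '[' then rest
    else if c = '}' ∧ top = '{' then rest
    else if c = ')' ∧ top = '(' then rest
    else c :: top :: rest

-- check(s): 'for i in range(len(s)): … s[i] …' visits the characters in order = foldl over them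
def check (s : List Char) : Bool :=
  (s.foldl checkStep []).isEmpty

-- deque.rotate(-1): move the front element to the back (no-op on an empty deque)
def rotateOnce (box : List Char) : List Char :=
  match box with
  | [] => []
  | x :: xs => xs ++ [x]

def solution (s : String) : Int :=
  let box := s.toList
  ((PySem.List.pyRange 0 (box.length : Int) 1).foldl
    (fun (st : Int × List Char) _ =>
      (if check st.2 = true then st.1 + 1 else st.1, rotateOnce st.2))
    (0, box)).1

-- ===== PORT B =====
-- t.replace(xy, "") for a TWO-character pattern xy = [a, b]: exact hand port of CPython's
-- left-to-right non-overlapping scan (PySem.Chars.replace computes the same value via a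
-- fuel-indexed worker; this structural form is what the proofs unfold)
def rmPair (a b : Char) : List Char → List Char
  | x :: y :: rest => if x = a ∧ y = b then rmPair a b rest else x :: rmPair a b (y :: rest)
  | xs => xs

-- termination measure for the while-loop below: one replace pass returns the input or a shorter list
theorem rmPair_eq_or_lt (a b : Char) (xs : List Char) :
    rmPair a b xs = xs ∨ (rmPair a b xs).length < xs.length := by
  induction xs using rmPair.induct a b with
  | case1 x y rest hp ih =>
      rw [rmPair, if_pos hp]
      rcases ih with h | h
      · right; rw [h]; simp
      · right; simp; omega
  | case2 x y rest hp ih =>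
      rw [rmPair, if_neg hp]
      rcases ih with h | h
      · left; rw [h]
      · right; simp at h ⊢; omega
  | case3 xs h1 =>
      left
      rcases xs with _ | ⟨x, _ | ⟨y, r⟩⟩
      · rfl
      · rfl
      · exact (h1 x y r rfl).elim

theorem rmPair_length_le (a b : Char) (xs : List Char) :
    (rmPair a b xs).length ≤ xs.length := by
  rcases rmPair_eq_or_lt a b xs with h | h
  · rw [h]
  · omega

-- the while-loop of _reduced_empty: iterate the three replaces until nothing changes
def reduceFix (s : List Char) : List Char :=
  let t := rmPair '{' '}' (rmPair '[' ']' (rmPair '(' ')' s))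
  if h : t = s then s else reduceFix t
termination_by s.length
decreasing_by
  have l1 := rmPair_length_le '(' ')' s
  have l2 := rmPair_length_le '[' ']' (rmPair '(' ')' s)
  have l3 := rmPair_length_le '{' '}' (rmPair '[' ']' (rmPair '(' ')' s))
  rcases rmPair_eq_or_lt '(' ')' s with h1 | h1 <;>
    rcases rmPair_eq_or_lt '[' ']' (rmPair '(' ')' s) with h2 | h2 <;>
      rcases rmPair_eq_or_lt '{' '}' (rmPair '[' ']' (rmPair '(' ')' s)) with h3 | h3 <;>
        first
        | (exact absurd (h3.trans (h2.trans h1)) h)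
        | omega

-- _reduced_empty(t): the loop's fixpoint, then the emptiness test 't == ""'
def reducedEmpty (t : List Char) : Bool := decide (reduceFix t = [])

def solution_alt (s : String) : Int :=
  let l := s.toList
  let n := l.length
  let d := l ++ l
  (PySem.List.pyRange 0 (n : Int) 1).foldl
    (fun (acc : Int) i =>
      if reducedEmpty (PySem.List.slice d (some i) (some (i + (n : Int)))) then acc + 1 else acc) 0

-- ===== PRECONDITION & SPEC =====
def Spec_solution (s : String) (out : Int) : Prop := out = solution_alt s
instance (s : String) (out : Int) : Decidable (Spec_solution s out) := by unfold Spec_solution; infer_instance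

-- ===== CLAIM (what is proved, stated in full; the proofs are below) =====
def Claim_equal_solution : Prop := ∀ (s : String), Dom_solution s → Spec_solution s (solution s)

-- ===== LEMMAS AND PROOFS =====

-- (a, b) is one of the three bracket pairs
def IsPair (a b : Char) : Prop :=
  (a = '(' ∧ b = ')') ∨ (a = '[' ∧ b = ']') ∨ (a = '{' ∧ b = '}')

-- the stack machine ignores an adjacent matched pair: push the opener, pop it at once
theorem checkStep_pair (a b : Char) (h : IsPair a b) (st : List Char) :
    checkStep (checkStep st a) b = st := by
  rcases h with ⟨ha, hb⟩ | ⟨ha, hb⟩ | ⟨ha, hb⟩ <;> subst ha <;> subst hb <;>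
    rcases st with _ | ⟨t, r⟩ <;> simp [checkStep]

-- one replace pass does not change the final stack
theorem foldl_rmPair (a b : Char) (h : IsPair a b) (xs : List Char) :
    ∀ st : List Char, List.foldl checkStep st (rmPair a b xs) = List.foldl checkStep st xs := by
  induction xs using rmPair.induct a b with
  | case1 x y rest hp ih =>
      intro st
      rw [rmPair, if_pos hp, ih st, List.foldl_cons, List.foldl_cons,
          hp.1, hp.2, checkStep_pair a b h st]
  | case2 x y rest hp ih =>
      intro st
      rw [rmPair, if_neg hp, List.foldl_cons, List.foldl_cons, ih]
  | case3 xs h1 =>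
      intro st
      rcases xs with _ | ⟨x, _ | ⟨y, r⟩⟩
      · rfl
      · rfl
      · exact (h1 x y r rfl).elim

-- the whole reduction loop does not change the final stack
theorem foldl_reduceFix (s : List Char) :
    ∀ st : List Char, List.foldl checkStep st (reduceFix s) = List.foldl checkStep st s := by
  induction s using reduceFix.induct with
  | case1 s t h => intro st; rw [reduceFix, dif_pos h]
  | case2 s t h ih =>
      intro st
      rw [reduceFix, dif_neg h, ih st,
          foldl_rmPair '{' '}' (by simp [IsPair]),
          foldl_rmPair '[' ']' (by simp [IsPair]),
          foldl_rmPair '(' ')' (by simp [IsPair])]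

-- t is irreducible: each of the three replaces fixes it
def Irr (t : List Char) : Prop :=
  rmPair '(' ')' t = t ∧ rmPair '[' ']' t = t ∧ rmPair '{' '}' t = t

-- a fixed point of one replace pass starts with no occurrence of the pair, and its tail is fixed too
theorem rmPair_fix_cons (a b x y : Char) (rest : List Char)
    (h : rmPair a b (x :: y :: rest) = x :: y :: rest) :
    ¬(x = a ∧ y = b) ∧ rmPair a b (y :: rest) = y :: rest := by
  by_cases hp : x = a ∧ y = b
  · exfalso
    rw [rmPair, if_pos hp] at h
    have hl := congrArg List.length h
    have := rmPair_length_le a b rest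
    simp at hl
    omega
  · rw [rmPair, if_neg hp] at h
    exact ⟨hp, List.cons_injective h⟩

theorem irr_cons (x y : Char) (rest : List Char) (h : Irr (x :: y :: rest)) :
    (¬(x = '(' ∧ y = ')') ∧ ¬(x = '[' ∧ y = ']') ∧ ¬(x = '{' ∧ y = '}')) ∧ Irr (y :: rest) := by
  obtain ⟨h1, h2, h3⟩ := h
  obtain ⟨n1, f1⟩ := rmPair_fix_cons _ _ _ _ _ h1
  obtain ⟨n2, f2⟩ := rmPair_fix_cons _ _ _ _ _ h2
  obtain ⟨n3, f3⟩ := rmPair_fix_cons _ _ _ _ _ h3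
  exact ⟨⟨n1, n2, n3⟩, f1, f2, f3⟩

-- on an irreducible string the stack machine never pops: every character is pushed
theorem foldl_irr (t : List Char) :
    ∀ (x : Char) (st : List Char), Irr (x :: t) →
      List.foldl checkStep (x :: st) t = t.reverse ++ x :: st := by
  induction t with
  | nil => intro x st _; rfl
  | cons d rest ih =>
      intro x st h
      obtain ⟨⟨n1, n2, n3⟩, htail⟩ := irr_cons x d rest h
      have e1 : ¬(d = ']' ∧ x = '[') := fun hh => n2 ⟨hh.2, hh.1⟩
      have e2 : ¬(d = '}' ∧ x = '{') := fun hh => n3 ⟨hh.2, hh.1⟩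
      have e3 : ¬(d = ')' ∧ x = '(') := fun hh => n1 ⟨hh.2, hh.1⟩
      have hstep : checkStep (x :: st) d = d :: x :: st := by
        simp only [checkStep, if_neg e1, if_neg e2, if_neg e3]
      rw [List.foldl_cons, hstep, ih d (x :: st) htail]
      simp

-- a full fixed point of the three-replace chain is irreducible
theorem chain_fix (s : List Char)
    (h : rmPair '{' '}' (rmPair '[' ']' (rmPair '(' ')' s)) = s) : Irr s := by
  have hl := congrArg List.length h
  have l2 := rmPair_length_le '[' ']' (rmPair '(' ')' s)
  have l3 := rmPair_length_le '{' '}' (rmPair '[' ']' (rmPair '(' ')' s))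
  rcases rmPair_eq_or_lt '(' ')' s with h1 | h1
  swap
  · exfalso; omega
  rw [h1] at h hl l2 l3
  rcases rmPair_eq_or_lt '[' ']' s with h2 | h2
  swap
  · exfalso; omega
  rw [h2] at h
  exact ⟨h1, h2, h⟩

-- the reduction loop's result is irreducible
theorem reduceFix_irr (s : List Char) : Irr (reduceFix s) := by
  induction s using reduceFix.induct with
  | case1 s t h => rw [reduceFix, dif_pos h]; exact chain_fix s h
  | case2 s t h ih => rw [reduceFix, dif_neg h]; exact ih

-- the stack machine accepts exactly the strings whose pair-elimination fixpoint is empty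
theorem check_eq_reducedEmpty (l : List Char) : check l = reducedEmpty l := by
  unfold check reducedEmpty
  rw [← foldl_reduceFix l []]
  have hirr : Irr (reduceFix l) := reduceFix_irr l
  cases ht : reduceFix l with
  | nil => simp
  | cons c t' =>
      rw [ht] at hirr
      have h0 : checkStep [] c = [c] := rfl
      rw [List.foldl_cons, h0, foldl_irr t' c [] hirr]
      simp

-- rotation k of l (what A's deque holds after k rotate(-1) calls)
def rot (l : List Char) (k : Nat) : List Char := l.drop k ++ l.take k

-- B's window (l ++ l)[k : k + n] is exactly rotation k
theorem window_eq_rot (l : List Char) (k : Nat) (hk : k ≤ l.length) :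
    PySem.List.slice (l ++ l) (some (k : Int)) (some ((k : Int) + (l.length : Int))) = rot l k := by
  have hc : ((k : Int) + (l.length : Int)) = ((k + l.length : Nat) : Int) := by push_cast; ring
  rw [hc, PySem.List.slice_natCast, Nat.add_sub_cancel_left,
      List.drop_append_of_le_length hk, List.take_append, rot]
  congr 1
  · exact List.take_of_length_le (by simp)
  · congr 1
    simp [Nat.sub_sub_self hk]

theorem rot_succ (l : List Char) (k : Nat) (hk : k < l.length) :
    rot l (k + 1) = rotateOnce (rot l k) := by
  rw [rot, rot, List.drop_eq_getElem_cons hk]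
  simp only [List.cons_append, rotateOnce]
  rw [List.take_add_one, List.getElem?_eq_getElem hk]
  simp

-- both loops, run from rotation k with accumulator ans, produce the same count
theorem loop_eq (l : List Char) :
    ∀ (m k : Nat), k + m = l.length → ∀ ans : Int,
      (List.foldl (fun (st : Int × List Char) _ =>
          (if check st.2 = true then st.1 + 1 else st.1, rotateOnce st.2))
        (ans, rot l k) (PySem.List.pyRange (k : Int) (l.length : Int) 1)).1
      = List.foldl (fun (acc : Int) i =>
          if reducedEmpty (PySem.List.slice (l ++ l) (some i) (some (i + (l.length : Int)))) then acc + 1 else acc)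
        ans (PySem.List.pyRange (k : Int) (l.length : Int) 1) := by
  intro m
  induction m with
  | zero =>
      intro k hk ans
      have hr : PySem.List.pyRange (k : Int) (l.length : Int) 1 = [] := by
        have : ∀ x, x ∉ PySem.List.pyRange (k : Int) (l.length : Int) 1 := by
          intro x hx
          rw [PySem.List.mem_pyRange_one] at hx
          omega
        exact List.eq_nil_iff_forall_not_mem.mpr this
      rw [hr]
      rfl
  | succ m ih =>
      intro k hk ans
      have hklt : (k : Int) < (l.length : Int) := by exact_mod_cast Nat.lt_of_lt_of_le (Nat.lt_succ_of_le (Nat.le_refl k)) (by omega)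
      rw [PySem.List.pyRange_one_cons hklt, List.foldl_cons, List.foldl_cons]
      simp only
      rw [window_eq_rot l k (by omega), ← check_eq_reducedEmpty,
          ← rot_succ l k (by omega)]
      have hc : ((k : Int) + 1) = ((k + 1 : Nat) : Int) := by push_cast; ring
      rw [hc]
      exact ih (k + 1) (by omega) (if check (rot l k) = true then ans + 1 else ans)

-- ===== VERDICT (by name: the statement is the Claim_ definition above) =====
theorem solution_spec : Claim_equal_solution := by
  unfold Claim_equal_solution Spec_solution
  intro s _
  unfold solution solution_alt
  have h := loop_eq s.toList s.toList.length 0 (by omega) 0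
  simpa [rot] using h
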